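-- pv_equiv track=rewrite | github.com/juyoung810/idecs-algorithm-study | KKS/boj/1972/1972.py | check_surprise
-- ===== SOURCE A (Python) =====
-- def check_surprise(word):
--     N = len(word)
--     for dist in range(1, N):
--         wordset = set()
--         for i in range(0, N-dist):
--             d_word = word[i]+word[i+dist]
--             if d_word in wordset:
--                 return False
--             else:
--                 wordset.add(d_word)
--     return True
-- ===== SOURCE B (Python) =====
-- def check_surprise(word):
--     N = len(word)
--     trips = sorted((j - i, word[i], word[j]) for i in range(N) for j in range(i + 1, N))
--     return all(trips[k] != trips[k + 1] for k in range(len(trips) - 1))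
-- ===== Notes on version B (the rewrite author's own statement) =====
-- stated objective: alternative
-- what changed: Replaced the per-distance seen-set with early-exit membership tests by a global sort-and-scan: build one flat list of (distance, left char, right char) triples over all index pairs i<j, sort it, and report a repeat iff two sorted neighbours are equal.
import Mathlib
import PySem

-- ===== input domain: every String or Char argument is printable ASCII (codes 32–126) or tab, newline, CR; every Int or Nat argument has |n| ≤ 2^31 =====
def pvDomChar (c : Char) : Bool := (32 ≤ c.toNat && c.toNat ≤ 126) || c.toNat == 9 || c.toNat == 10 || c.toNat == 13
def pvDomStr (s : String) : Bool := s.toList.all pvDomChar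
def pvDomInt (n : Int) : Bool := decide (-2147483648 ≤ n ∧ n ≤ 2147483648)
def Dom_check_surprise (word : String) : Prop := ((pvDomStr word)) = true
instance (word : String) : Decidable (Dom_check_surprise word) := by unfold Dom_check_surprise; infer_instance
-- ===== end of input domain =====

-- B replaces A's per-distance seen-set with early exit by a global sort-and-scan over all
-- (distance, left char, right char) triples; an alternative algorithm, no speed claim.

-- ===== PORT A =====
-- inner loop: for i in range(0, N-dist): d_word = word[i]+word[i+dist]; membership test with
-- early return, else add (d_word, a 2-character string, is represented as its character list;
-- indices are always in range, so pyGetD's default is never used)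
def csInnerA (cs : List Char) (dist : Int) : List Int → PySem.Set (List Char) → Bool
  | [], _ => true
  | i :: rest, wordset =>
    let d_word := [PySem.List.pyGetD cs i ' '] ++ [PySem.List.pyGetD cs (i + dist) ' ']
    if PySem.Set.contains wordset d_word then false
    else csInnerA cs dist rest (PySem.Set.add wordset d_word)

-- outer loop: for dist in range(1, N): wordset = set(); … (an inner `return False` leaves the whole function)
def csOuterA (cs : List Char) (N : Int) : List Int → Bool
  | [] => true
  | dist :: rest =>
    match csInnerA cs dist (PySem.List.pyRange 0 (N - dist) 1) PySem.Set.empty with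
    | false => false
    | true => csOuterA cs N rest

def check_surprise (word : String) : Bool :=
  let cs := word.toList
  let N : Int := cs.length
  csOuterA cs N (PySem.List.pyRange 1 N 1)

-- ===== PORT B =====
-- Python sorts the (int, 1-char str, 1-char str) tuples lexicographically; PySem.List.sorted
-- takes a key into a linear order, so the tuple order is rendered by tripsKey, an injective,
-- strictly order-preserving Int encoding (Char codes are < 1114112).
def tripsKey (t : Int × Char × Char) : Int :=
  (t.1 * 1114112 + t.2.1.toNat) * 1114112 + t.2.2.toNat

def check_surprise_alt (word : String) : Bool :=
  let cs := word.toList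
  let N : Int := cs.length
  -- trips = sorted((j - i, word[i], word[j]) for i in range(N) for j in range(i + 1, N))
  let trips := PySem.List.sorted
    ((PySem.List.pyRange 0 N 1).flatMap (fun i =>
      (PySem.List.pyRange (i + 1) N 1).map (fun j =>
        (j - i, PySem.List.pyGetD cs i ' ', PySem.List.pyGetD cs j ' '))))
    tripsKey false
  -- all(trips[k] != trips[k + 1] for k in range(len(trips) - 1))  (indices always in range)
  (PySem.List.pyRange 0 ((trips.length : Int) - 1) 1).all (fun k =>
    decide (PySem.List.pyGetD trips k (0, ' ', ' ') ≠ PySem.List.pyGetD trips (k + 1) (0, ' ', ' ')))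

-- ===== PRECONDITION & SPEC =====
def Spec_check_surprise (word : String) (out : Bool) : Prop := out = check_surprise_alt word
instance (word : String) (out : Bool) : Decidable (Spec_check_surprise word out) := by unfold Spec_check_surprise; infer_instance

-- ===== CLAIM (what is proved, stated in full; the proofs are below) =====
def Claim_equal_check_surprise : Prop := ∀ (word : String), Dom_check_surprise word → Spec_check_surprise word (check_surprise word)

-- ===== LEMMAS AND PROOFS =====

-- Both programs decide this one property: the pair-of-characters map at each distance is
-- injective on index pairs (no repeated distance-pair).
def PhiCS (cs : List Char) : Prop :=
  ∀ i₁ j₁ i₂ j₂ : Int, 0 ≤ i₁ → i₁ < j₁ → j₁ < (cs.length : Int) →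
    0 ≤ i₂ → i₂ < j₂ → j₂ < (cs.length : Int) →
    j₁ - i₁ = j₂ - i₂ →
    PySem.List.pyGetD cs i₁ ' ' = PySem.List.pyGetD cs i₂ ' ' →
    PySem.List.pyGetD cs j₁ ' ' = PySem.List.pyGetD cs j₂ ' ' → i₁ = i₂

theorem char_toNat_lt (c : Char) : c.toNat < 1114112 := by
  have h := c.valid
  unfold Nat.isValidChar UInt32.isValidChar at h
  have : c.toNat = c.val.toNat := rfl
  rcases h with h | ⟨_, h2⟩ <;> omega

theorem tripsKey_inj : Function.Injective tripsKey := by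
  rintro ⟨d₁, a₁, b₁⟩ ⟨d₂, a₂, b₂⟩ h
  unfold tripsKey at h
  simp only at h
  have ha₁ := char_toNat_lt a₁
  have ha₂ := char_toNat_lt a₂
  have hb₁ := char_toNat_lt b₁
  have hb₂ := char_toNat_lt b₂
  have hd : d₁ = d₂ ∧ a₁.toNat = a₂.toNat ∧ b₁.toNat = b₂.toNat := by
    constructor; · omega
    constructor <;> omega
  obtain ⟨h1, h2, h3⟩ := hd
  exact Prod.ext h1 (Prod.ext (Char.ext (UInt32.toNat_inj.mp h2)) (Char.ext (UInt32.toNat_inj.mp h3)))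

-- ------- A side -------

theorem csInnerA_eq_nodup {cs : List Char} {dist : Int} (idxs : List Int)
    (s : PySem.Set (List Char)) :
    csInnerA cs dist idxs s =
      decide ((idxs.map (fun i => [PySem.List.pyGetD cs i ' '] ++ [PySem.List.pyGetD cs (i + dist) ' '])).Nodup ∧
        ∀ x ∈ idxs.map (fun i => [PySem.List.pyGetD cs i ' '] ++ [PySem.List.pyGetD cs (i + dist) ' ']), x ∉ s) := by
  induction idxs generalizing s with
  | nil => simp [csInnerA]
  | cons i rest ih =>
    simp only [csInnerA, List.map_cons]
    by_cases h : ([PySem.List.pyGetD cs i ' '] ++ [PySem.List.pyGetD cs (i + dist) ' ']) ∈ s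
    · rw [if_pos ((PySem.Set.contains_iff s _).2 h)]
      simp only [eq_comm (a := false), decide_eq_false_iff_not]
      intro hc
      exact (hc.2 _ (List.mem_cons_self)) h
    · rw [if_neg (fun hc => h ((PySem.Set.contains_iff s _).1 hc)), ih]
      rw [decide_eq_decide]
      simp only [List.nodup_cons, List.mem_cons, PySem.Set.mem_add]
      constructor
      · rintro ⟨hn, hall⟩
        have h1 : ∀ x ∈ rest.map (fun i => [PySem.List.pyGetD cs i ' '] ++ [PySem.List.pyGetD cs (i + dist) ' ']), ¬(x ∈ s ∨ x = [PySem.List.pyGetD cs i ' '] ++ [PySem.List.pyGetD cs (i + dist) ' ']) :=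
          fun x hx => hall x hx
        refine ⟨⟨fun hm => h1 _ hm (Or.inr rfl), hn⟩, ?_⟩
        rintro x (rfl | hx)
        · exact h
        · exact fun hs => h1 x hx (Or.inl hs)
      · rintro ⟨⟨hnm, hn⟩, hall⟩
        refine ⟨hn, fun x hx => ?_⟩
        rintro (hs | rfl)
        · exact hall x (Or.inr hx) hs
        · exact hnm hx

theorem csOuterA_eq_all (cs : List Char) (N : Int) (ds : List Int) :
    csOuterA cs N ds =
      ds.all (fun dist => csInnerA cs dist (PySem.List.pyRange 0 (N - dist) 1) PySem.Set.empty) := by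
  induction ds with
  | nil => rfl
  | cons d rest ih =>
    simp only [csOuterA, List.all_cons]
    cases h : csInnerA cs d (PySem.List.pyRange 0 (N - d) 1) PySem.Set.empty with
    | false => simp
    | true => simpa using ih

theorem A_iff (word : String) : check_surprise word = true ↔ PhiCS word.toList := by
  unfold check_surprise PhiCS
  rw [csOuterA_eq_all, List.all_eq_true]
  constructor
  · intro h i₁ j₁ i₂ j₂ h1 h2 h3 h4 h5 h6 hd ha hb
    have hmem : (j₁ - i₁) ∈ PySem.List.pyRange 1 (word.toList.length : Int) 1 :=
      (PySem.List.mem_pyRange_one).2 (by omega)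
    have := h _ hmem
    rw [csInnerA_eq_nodup] at this
    have hnd := (of_decide_eq_true this).1
    rw [List.nodup_map_iff_inj_on (PySem.List.nodup_pyRange_one _ _)] at hnd
    have hi₁ : i₁ ∈ PySem.List.pyRange 0 ((word.toList.length : Int) - (j₁ - i₁)) 1 :=
      (PySem.List.mem_pyRange_one).2 (by omega)
    have hi₂ : i₂ ∈ PySem.List.pyRange 0 ((word.toList.length : Int) - (j₁ - i₁)) 1 :=
      (PySem.List.mem_pyRange_one).2 (by omega)
    refine hnd i₁ hi₁ i₂ hi₂ ?_
    have e1 : i₁ + (j₁ - i₁) = j₁ := by omega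
    have e2 : i₂ + (j₁ - i₁) = j₂ := by omega
    rw [e1, e2, ha, hb]
  · intro hφ d hd
    rw [csInnerA_eq_nodup]
    apply decide_eq_true
    have hd' := (PySem.List.mem_pyRange_one).1 hd
    constructor
    · rw [List.nodup_map_iff_inj_on (PySem.List.nodup_pyRange_one _ _)]
      intro x hx y hy hxy
      have hx' := (PySem.List.mem_pyRange_one).1 hx
      have hy' := (PySem.List.mem_pyRange_one).1 hy
      simp only [List.cons_append, List.nil_append, List.cons.injEq, and_true] at hxy
      exact hφ x (x + d) y (y + d) (by omega) (by omega) (by omega) (by omega) (by omega)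
        (by omega) (by omega) hxy.1 hxy.2
    · intro x _ hx
      simp [PySem.Set.empty] at hx

-- ------- B side -------

theorem pairwise_pyRange_iff (R : Int → Int → Prop) (a b : Int) :
    List.Pairwise R (PySem.List.pyRange a b 1) ↔
      ∀ x y : Int, a ≤ x → x < y → y < b → R x y := by
  rw [List.pairwise_iff_getElem]
  constructor
  · intro h x y hx hxy hy
    have hx' : (x - a).toNat < (PySem.List.pyRange a b 1).length := by
      rw [PySem.List.length_pyRange_one]; omega
    have hy' : (y - a).toNat < (PySem.List.pyRange a b 1).length := by
      rw [PySem.List.length_pyRange_one]; omega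
    have := h _ _ hx' hy' (by omega)
    rwa [PySem.List.getElem_pyRange_one, PySem.List.getElem_pyRange_one,
      show a + ((x - a).toNat : Int) = x by omega,
      show a + ((y - a).toNat : Int) = y by omega] at this
  · intro h p q hp hq hpq
    rw [PySem.List.getElem_pyRange_one, PySem.List.getElem_pyRange_one]
    have hq' := hq
    rw [PySem.List.length_pyRange_one] at hq'
    exact h _ _ (by omega) (by omega) (by omega)

-- the flat triple list of B, before sorting
def rawTrips (cs : List Char) : List (Int × Char × Char) :=
  (PySem.List.pyRange 0 (cs.length : Int) 1).flatMap (fun i =>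
    (PySem.List.pyRange (i + 1) (cs.length : Int) 1).map (fun j =>
      (j - i, PySem.List.pyGetD cs i ' ', PySem.List.pyGetD cs j ' ')))

theorem rawTrips_nodup_iff (cs : List Char) : (rawTrips cs).Nodup ↔ PhiCS cs := by
  unfold rawTrips PhiCS
  rw [List.nodup_flatMap]
  constructor
  · rintro ⟨hin, hdis⟩ i₁ j₁ i₂ j₂ h1 h2 h3 h4 h5 h6 hd ha hb
    by_cases hii : i₁ = i₂
    · exact hii
    · exfalso
      rw [pairwise_pyRange_iff] at hdis
      have key : ∀ x y jx jy : Int, 0 ≤ x → x < y → x < jx → jx < (cs.length : Int) →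
          y < jy → jy < (cs.length : Int) →
          (jx - x, PySem.List.pyGetD cs x ' ', PySem.List.pyGetD cs jx ' ') =
          (jy - y, PySem.List.pyGetD cs y ' ', PySem.List.pyGetD cs jy ' ') → False := by
        intro x y jx jy hx hxy hjx hjxN hjy hjyN heq
        have hD := hdis x y hx hxy (by omega)
        refine hD (a := (jx - x, PySem.List.pyGetD cs x ' ', PySem.List.pyGetD cs jx ' ')) ?_ ?_
        · exact List.mem_map.2 ⟨jx, (PySem.List.mem_pyRange_one).2 (by omega), rfl⟩
        · rw [heq]
          exact List.mem_map.2 ⟨jy, (PySem.List.mem_pyRange_one).2 (by omega), rfl⟩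
      rcases lt_or_gt_of_ne hii with hlt | hgt
      · exact key i₁ i₂ j₁ j₂ (by omega) hlt h2 h3 h5 h6
          (by rw [Prod.mk.injEq, Prod.mk.injEq]; exact ⟨by omega, ha, hb⟩)
      · exact key i₂ i₁ j₂ j₁ (by omega) hgt h5 h6 h2 h3
          (by rw [Prod.mk.injEq, Prod.mk.injEq]; exact ⟨by omega, ha.symm, hb.symm⟩)
  · intro hφ
    constructor
    · intro i _
      rw [List.nodup_map_iff_inj_on (PySem.List.nodup_pyRange_one _ _)]
      intro x _ y _ hxy
      rw [Prod.mk.injEq] at hxy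
      omega
    · rw [pairwise_pyRange_iff]
      intro x y hx hxy hy t htx hty
      rcases List.mem_map.1 htx with ⟨jx, hjx, rfl⟩
      rcases List.mem_map.1 hty with ⟨jy, hjy, heq⟩
      have hjx' := (PySem.List.mem_pyRange_one).1 hjx
      have hjy' := (PySem.List.mem_pyRange_one).1 hjy
      rw [Prod.mk.injEq, Prod.mk.injEq] at heq
      have := hφ x jx y jy (by omega) (by omega) (by omega) (by omega) (by omega) (by omega)
        (by omega) heq.2.1.symm heq.2.2.symm
      omega

set_option maxHeartbeats 1000000 in
theorem B_iff (word : String) : check_surprise_alt word = true ↔ PhiCS word.toList := by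
  have e : check_surprise_alt word =
      (PySem.List.pyRange 0 (((PySem.List.sorted (rawTrips word.toList) tripsKey false).length : Int) - 1) 1).all
        (fun k => decide (PySem.List.pyGetD (PySem.List.sorted (rawTrips word.toList) tripsKey false) k (0, ' ', ' ') ≠
          PySem.List.pyGetD (PySem.List.sorted (rawTrips word.toList) tripsKey false) (k + 1) (0, ' ', ' '))) := rfl
  rw [e]
  set trips := PySem.List.sorted (rawTrips word.toList) tripsKey false with htrips
  rw [List.all_eq_true]
  have hperm := PySem.List.sorted_perm (rawTrips word.toList) tripsKey false
  rw [← rawTrips_nodup_iff, ← hperm.nodup_iff]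
  constructor
  · intro h
    -- adjacent distinct + sorted ⇒ the key list is strictly increasing ⇒ nodup
    have hchain : (trips.map tripsKey).IsChain (· < ·) := by
      rw [List.isChain_iff_getElem]
      intro p hp
      rw [List.length_map] at hp
      rw [List.getElem_map, List.getElem_map]
      have hne : trips[p] ≠ trips[p + 1] := by
        have hmem : (p : Int) ∈ PySem.List.pyRange 0 ((trips.length : Int) - 1) 1 :=
          (PySem.List.mem_pyRange_one).2 (by omega)
        have := of_decide_eq_true (h _ hmem)
        rw [PySem.List.pyGetD_eq_getElem _ _ (by omega) (by omega),
          PySem.List.pyGetD_eq_getElem _ _ (by omega) (by omega)] at this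
        have e2 : ((p : Int) + 1) = ((p + 1 : Nat) : Int) := by push_cast; ring
        simpa only [e2, Int.toNat_natCast] using this
      have hle : tripsKey (trips[p]'(by omega)) ≤ tripsKey (trips[p + 1]'hp) :=
        PySem.List.key_sorted_getElem_mono (rawTrips word.toList) tripsKey (Nat.le_succ p) hp
      exact lt_of_le_of_ne hle (fun hk => hne (tripsKey_inj hk))
    have hnd : (trips.map tripsKey).Nodup :=
      (hchain.pairwise).imp (fun h => ne_of_lt h)
    exact hnd.of_map _
  · intro hnd k hk
    apply decide_eq_true
    have hk' := (PySem.List.mem_pyRange_one).1 hk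
    rw [PySem.List.pyGetD_eq_getElem _ _ (by omega) (by omega),
      PySem.List.pyGetD_eq_getElem _ _ (by omega) (by omega)]
    intro heq
    have := hnd.getElem_inj_iff.1 heq
    omega

-- ===== VERDICT (by name: the statement is the Claim_ definition above) =====
theorem check_surprise_spec : Claim_equal_check_surprise := by
  intro word _
  unfold Spec_check_surprise
  rw [Bool.eq_iff_iff, A_iff, B_iff]
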